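-- pv_equiv track=rewrite | github.com/scieloorg/PC-Programs | src/scielo/bin/xml/modules/xpmaker.py | fix_mixed_citation_ext_link
-- ===== SOURCE A (Python) =====
-- def fix_mixed_citation_ext_link(ref):
--     if '<ext-link' in ref and '<mixed-citation>' in ref:
--         mixed_citation = ref[ref.find('<mixed-citation>')+len('<mixed-citation>'):ref.find('</mixed-citation>')]
--         new_mixed_citation = mixed_citation
--         if not '<ext-link' in mixed_citation:
--             for ext_link in ref.replace('<ext-link', '~BREAK~<ext-link').split('~BREAK~'):
--                 if ext_link.startswith('<ext-link'):
--                     if '</ext-link>' in ext_link: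
--                         ext_link = ext_link[0:ext_link.find('</ext-link>')+len('</ext-link>')]
--                         content = ext_link[ext_link.find('>')+1:]
--                         content = content[0:content.find('</ext-link>')]
--                         new_mixed_citation = new_mixed_citation.replace(content, ext_link)
--             if new_mixed_citation != mixed_citation:
--                 ref = ref.replace(mixed_citation, new_mixed_citation)
--     return ref
-- ===== SOURCE B (Python) =====
-- def _ext_link_pairs(s):
--     """Recursively collect (content, element) replacement pairs, one per complete
--     ext-link element of s, in document order."""
--     i = s.find('<ext-link')
--     if i == -1:
--         return []
--     body = s[i + len('<ext-link'):]
--     nxt = body.find('<ext-link')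
--     close = body.find('</ext-link>')
--     pairs = []
--     if close != -1 and (nxt == -1 or close + len('</ext-link>') <= nxt):
--         element = '<ext-link' + body[:close + len('</ext-link>')]
--         content = element[element.find('>') + 1:]
--         content = content[:content.find('</ext-link>')]
--         pairs.append((content, element))
--     return pairs + _ext_link_pairs(body)
--
--
-- def fix_mixed_citation_ext_link(ref):
--     if '<ext-link' in ref and '<mixed-citation>' in ref:
--         mixed_citation = ref[ref.find('<mixed-citation>') + len('<mixed-citation>'):ref.find('</mixed-citation>')]
--         if '<ext-link' not in mixed_citation:
--             new_mixed_citation = mixed_citation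
--             for content, element in _ext_link_pairs(ref):
--                 new_mixed_citation = new_mixed_citation.replace(content, element)
--             if new_mixed_citation != mixed_citation:
--                 ref = ref.replace(mixed_citation, new_mixed_citation)
--     return ref
-- ===== Notes on version B (the rewrite author's own statement) =====
-- stated objective: alternative
-- what changed: B replaces A's sentinel pipeline (replace every '<ext-link' by '~BREAK~<ext-link', split on the sentinel, filter chunks by startswith, rewrite inline) with a recursive descent over the string that collects an explicit list of (content, element) replacement pairs -- one per complete ext-link element, validated by comparing the positions of the next open and close tags -- followed by a separate fold applying the replacements.
import Mathlib
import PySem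

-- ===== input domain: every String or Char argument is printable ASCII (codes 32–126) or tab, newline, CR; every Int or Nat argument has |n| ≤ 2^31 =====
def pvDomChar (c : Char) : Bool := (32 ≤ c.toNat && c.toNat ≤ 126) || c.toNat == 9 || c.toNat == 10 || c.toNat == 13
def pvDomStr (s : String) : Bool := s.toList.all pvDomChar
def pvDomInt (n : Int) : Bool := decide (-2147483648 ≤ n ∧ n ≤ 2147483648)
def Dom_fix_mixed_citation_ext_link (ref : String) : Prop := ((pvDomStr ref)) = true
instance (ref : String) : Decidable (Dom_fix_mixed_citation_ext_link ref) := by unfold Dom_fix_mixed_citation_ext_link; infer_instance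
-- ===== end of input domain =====

set_option maxRecDepth 8192


-- B replaces A's sentinel replace/split/startswith pipeline by a recursive descent that
-- collects an explicit (content, element) pair per complete ext-link element, then a
-- separate fold applies the replacements (alternative decomposition, same cost).

-- the tag strings as character lists (used by the ports)
def pvXl : List Char := ['<', 'e', 'x', 't', '-', 'l', 'i', 'n', 'k']
def pvCl : List Char := ['<', '/', 'e', 'x', 't', '-', 'l', 'i', 'n', 'k', '>']

-- ===== PORT A =====
-- loop body of A's for-loop (Python has it inline; named here so the proofs can speak about it)
def pvBodyA (nmc : String) (ext_link : String) : String :=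
  if PySem.Str.startswith ext_link "<ext-link" then
    if PySem.Str.isIn "</ext-link>" ext_link then
      -- ext_link = ext_link[0:ext_link.find('</ext-link>')+len('</ext-link>')]
      let ext_link2 := PySem.Str.slice ext_link (some 0) (some (PySem.Str.find ext_link "</ext-link>" + 11))
      -- content = ext_link[ext_link.find('>')+1:]
      let content := PySem.Str.slice ext_link2 (some (PySem.Str.find ext_link2 ">" + 1)) none
      -- content = content[0:content.find('</ext-link>')]
      let content2 := PySem.Str.slice content (some 0) (some (PySem.Str.find content "</ext-link>"))
      PySem.Str.replace nmc content2 ext_link2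
    else nmc
  else nmc

def fix_mixed_citation_ext_link (ref : String) : String :=
  if PySem.Str.isIn "<ext-link" ref && PySem.Str.isIn "<mixed-citation>" ref then
    let mixed_citation := PySem.Str.slice ref
      (some (PySem.Str.find ref "<mixed-citation>" + 16))
      (some (PySem.Str.find ref "</mixed-citation>"))
    if !PySem.Str.isIn "<ext-link" mixed_citation then
      let new_mixed_citation :=
        ((PySem.Str.split? (PySem.Str.replace ref "<ext-link" "~BREAK~<ext-link") "~BREAK~").getD []).foldl
          pvBodyA mixed_citation
      if new_mixed_citation ≠ mixed_citation then PySem.Str.replace ref mixed_citation new_mixed_citation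
      else ref
    else ref
  else ref

-- ===== PORT B =====
-- the per-occurrence pair construction in B's `_ext_link_pairs` (named so proofs can cite it);
-- `body` is the text after one '<ext-link' open tag
def pvHd (body : List Char) : List (List Char × List Char) :=
  let nxt := PySem.Chars.find body pvXl
  let close := PySem.Chars.find body pvCl
  if close ≠ -1 ∧ (nxt = -1 ∨ close + 11 ≤ nxt) then
    -- element = '<ext-link' + body[:close + 11]
    let element := pvXl ++ PySem.List.slice body none (some (close + 11))
    -- content = element[element.find('>') + 1:]
    let content := PySem.List.slice element (some (PySem.Chars.find element ['>'] + 1)) none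
    -- content = content[:content.find('</ext-link>')]
    let content2 := PySem.List.slice content none (some (PySem.Chars.find content pvCl))
    [(content2, element)]
  else []

-- B's recursive `_ext_link_pairs`, over the character list of the string
def pvPairs (s : List Char) : List (List Char × List Char) :=
  if h : PySem.Chars.find s pvXl = -1 then []
  else
    let body := s.drop ((PySem.Chars.find s pvXl).toNat + 9)
    pvHd body ++ pvPairs body
termination_by s.length
decreasing_by
  have h0 : 0 ≤ PySem.Chars.find s pvXl := by
    rcases (PySem.Chars.neg_one_le_find s pvXl).lt_or_eq with h1 | h1
    · omega
    · exact absurd h1.symm h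
  have hs := (PySem.Chars.find_spec h0).1
  have hlen : pvXl.length ≤ (s.drop (PySem.Chars.find s pvXl).toNat).length :=
    List.IsPrefix.length_le hs
  simp only [List.length_drop] at hlen ⊢
  have h9 : pvXl.length = 9 := by decide
  omega

-- body of B's replacement fold: new = new.replace(content, element)
def pvStepB (nmc : String) (p : List Char × List Char) : String :=
  PySem.Str.replace nmc (String.ofList p.1) (String.ofList p.2)

def fix_mixed_citation_ext_link_alt (ref : String) : String :=
  if PySem.Str.isIn "<ext-link" ref && PySem.Str.isIn "<mixed-citation>" ref then
    let mixed_citation := PySem.Str.slice ref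
      (some (PySem.Str.find ref "<mixed-citation>" + 16))
      (some (PySem.Str.find ref "</mixed-citation>"))
    if !PySem.Str.isIn "<ext-link" mixed_citation then
      let new_mixed_citation := (pvPairs ref.toList).foldl pvStepB mixed_citation
      if new_mixed_citation ≠ mixed_citation then PySem.Str.replace ref mixed_citation new_mixed_citation
      else ref
    else ref
  else ref

-- ===== PRECONDITION & SPEC =====
-- Pre_ excludes only refs that reach the rewriting loop (both tags present, no ext-link open
-- tag inside the mixed-citation element) while containing A's internal sentinel '~BREAK~'
-- (or the sentinel fragment without its trailing tilde directly before an ext-link open tag,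
-- which collides with the sentinel A inserts there): on such refs A's piece boundaries come from an unspecifiable
-- sentinel collision, a corner where A's and B's values are both defensible.
def Pre_fix_mixed_citation_ext_link (ref : String) : Prop :=
  (PySem.Str.isIn "~BREAK~" ref = false ∧ PySem.Str.isIn "~BREAK<ext-link" ref = false)
  ∨ (PySem.Str.isIn "<ext-link" ref && PySem.Str.isIn "<mixed-citation>" ref) = false
  ∨ PySem.Str.isIn "<ext-link" (PySem.Str.slice ref
      (some (PySem.Str.find ref "<mixed-citation>" + 16))
      (some (PySem.Str.find ref "</mixed-citation>"))) = true
instance (ref : String) : Decidable (Pre_fix_mixed_citation_ext_link ref) := by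
  unfold Pre_fix_mixed_citation_ext_link; infer_instance

def pvWitness_fix_mixed_citation_ext_link : String :=
  "<mixed-citation>x</mixed-citation><ext-link>x</ext-link>"

def Spec_fix_mixed_citation_ext_link (ref : String) (out : String) : Prop :=
  out = fix_mixed_citation_ext_link_alt ref
instance (ref : String) (out : String) : Decidable (Spec_fix_mixed_citation_ext_link ref out) := by
  unfold Spec_fix_mixed_citation_ext_link; infer_instance

-- ===== CLAIM (what is proved, stated in full; the proofs are below) =====
def Claim_equal_fix_mixed_citation_ext_link : Prop :=
  ∀ (ref : String), Dom_fix_mixed_citation_ext_link ref → Pre_fix_mixed_citation_ext_link ref →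
    Spec_fix_mixed_citation_ext_link ref (fix_mixed_citation_ext_link ref)

-- ===== LEMMAS AND PROOFS =====

-- the sentinel strings as character lists
def pvSl : List Char := ['~', 'B', 'R', 'E', 'A', 'K', '~']
def pvSXl : List Char := pvSl ++ pvXl
def pvS2l : List Char := ['~', 'B', 'R', 'E', 'A', 'K'] ++ pvXl

-- structural versions of Python str.replace / str.split (for a nonempty pattern)
def pvRp (old new : List Char) : List Char → List Char
  | [] => []
  | c :: t =>
    if h : old ≠ [] ∧ old.isPrefixOf (c :: t) then new ++ pvRp old new ((c :: t).drop old.length)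
    else c :: pvRp old new t
termination_by l => l.length
decreasing_by
  · have h1 : 1 ≤ old.length := List.length_pos_of_ne_nil h.1
    simp only [List.length_drop, List.length_cons]; omega
  · simp

def pvSp (sep : List Char) : List Char → List (List Char)
  | [] => [[]]
  | c :: t =>
    if h : sep ≠ [] ∧ sep.isPrefixOf (c :: t) then [] :: pvSp sep ((c :: t).drop sep.length)
    else (pvSp sep t).modifyHead (c :: ·)
termination_by l => l.length
decreasing_by
  · have h1 : 1 ≤ sep.length := List.length_pos_of_ne_nil h.1
    simp only [List.length_drop, List.length_cons]; omega
  · simp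

lemma pvRp_nil (old new : List Char) : pvRp old new [] = [] := by simp [pvRp]

lemma pvRp_pos (old new : List Char) (l : List Char) (ho : old ≠ []) (hp : old <+: l) :
    pvRp old new l = new ++ pvRp old new (l.drop old.length) := by
  cases l with
  | nil => rcases hp with ⟨u, hu⟩; simp at hu; rcases hu with ⟨h1, -⟩; exact absurd h1 ho
  | cons c t => rw [pvRp, dif_pos ⟨ho, List.isPrefixOf_iff_prefix.mpr hp⟩]

lemma pvRp_neg (old new : List Char) (c : Char) (t : List Char) (hp : ¬ old <+: (c :: t)) :
    pvRp old new (c :: t) = c :: pvRp old new t := by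
  rw [pvRp, dif_neg]
  intro h; exact hp (List.isPrefixOf_iff_prefix.mp h.2)

lemma pvSp_nil (sep : List Char) : pvSp sep [] = [[]] := by simp [pvSp]

lemma pvSp_pos (sep l : List Char) (hs : sep ≠ []) (hp : sep <+: l) :
    pvSp sep l = [] :: pvSp sep (l.drop sep.length) := by
  cases l with
  | nil => rcases hp with ⟨u, hu⟩; simp at hu; rcases hu with ⟨h1, -⟩; exact absurd h1 hs
  | cons c t => rw [pvSp, dif_pos ⟨hs, List.isPrefixOf_iff_prefix.mpr hp⟩]

lemma pvSp_neg (sep : List Char) (c : Char) (t : List Char) (hp : ¬ sep <+: (c :: t)) :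
    pvSp sep (c :: t) = (pvSp sep t).modifyHead (c :: ·) := by
  rw [pvSp, dif_neg]
  intro h; exact hp (List.isPrefixOf_iff_prefix.mp h.2)

lemma pvSp_append_sep (sep b : List Char) (hs : sep ≠ []) :
    pvSp sep (sep ++ b) = [] :: pvSp sep b := by
  rw [pvSp_pos sep (sep ++ b) hs (List.prefix_append sep b), List.drop_left]

lemma pvSp_ne_nil (sep l : List Char) : pvSp sep l ≠ [] := by
  induction l using pvSp.induct sep with
  | case1 => simp [pvSp_nil]
  | case2 c t h ih =>
      rw [pvSp, dif_pos h]; simp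
  | case3 c t h ih =>
      rw [pvSp, dif_neg h]
      cases hx : pvSp sep t with
      | nil => exact absurd hx ih
      | cons a b => simp

lemma pvSp_headI_prefix (sep l : List Char) : (pvSp sep l).headI <+: l := by
  induction l using pvSp.induct sep with
  | case1 => simp [pvSp_nil]
  | case2 c t h ih => rw [pvSp, dif_pos h]; simp
  | case3 c t h ih =>
      rw [pvSp, dif_neg h]
      cases hx : pvSp sep t with
      | nil => exact absurd hx (pvSp_ne_nil sep t)
      | cons a b =>
          rw [hx] at ih
          simp only [List.modifyHead_cons, List.headI_cons]
          exact List.cons_prefix_cons.mpr ⟨rfl, by simpa using ih⟩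

lemma pv_modifyHead_id {α : Type} (l : List α) : l.modifyHead (fun x => x) = l := by
  cases l <;> simp

-- splitting a++b where no sep occurrence starts inside a
lemma pvSp_append_left (sep a b : List Char)
    (h : ∀ i < a.length, ¬ sep <+: (a ++ b).drop i) :
    pvSp sep (a ++ b) = (pvSp sep b).modifyHead (a ++ ·) := by
  induction a with
  | nil =>
      simp only [List.nil_append]
      rw [pv_modifyHead_id]
  | cons c a' ih =>
      have h0 : ¬ sep <+: (c :: (a' ++ b)) := by
        have := h 0 (by simp); simpa using this
      rw [List.cons_append, pvSp_neg sep c (a' ++ b) h0,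
        ih (fun i hi => by have := h (i + 1) (by simp; omega); simpa using this)]
      cases pvSp sep b with
      | nil => simp
      | cons p r => simp

-- go-function bridges
lemma pvSp_go (sep : List Char) (hs : sep ≠ []) :
    ∀ (fuel : ℕ) (l cur : List Char) (acc : List (List Char)), l.length ≤ fuel →
      PySem.Chars.splitOn.go sep fuel l cur acc
        = acc.reverse ++ (pvSp sep l).modifyHead (cur.reverse ++ ·) := by
  intro fuel
  induction fuel with
  | zero =>
      intro l cur acc hl
      have : l = [] := by cases l <;> simp_all
      subst this
      simp [PySem.Chars.splitOn.go, pvSp_nil]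
  | succ n ih =>
      intro l cur acc hl
      cases l with
      | nil => simp [PySem.Chars.splitOn.go, pvSp_nil]
      | cons c t =>
          by_cases hp : sep <+: (c :: t)
          · have hb : sep.isPrefixOf (c :: t) = true := List.isPrefixOf_iff_prefix.mpr hp
            have hlen : 1 ≤ sep.length := List.length_pos_of_ne_nil hs
            have hdrop : ((c :: t).drop sep.length).length ≤ n := by
              simp only [List.length_drop, List.length_cons]
              simp only [List.length_cons] at hl; omega
            simp only [PySem.Chars.splitOn.go, hb, if_true]
            rw [ih ((c :: t).drop sep.length) [] (cur.reverse :: acc) hdrop]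
            rw [pvSp_pos sep (c :: t) hs hp]
            simp [pv_modifyHead_id]
          · have hb : sep.isPrefixOf (c :: t) = false := by
              rw [Bool.eq_false_iff]
              exact fun hc => hp (List.isPrefixOf_iff_prefix.mp hc)
            simp only [PySem.Chars.splitOn.go, hb, Bool.false_eq_true, if_false]
            rw [ih t (c :: cur) acc (by simp only [List.length_cons] at hl; omega)]
            rw [pvSp_neg sep c t hp]
            cases hx : pvSp sep t with
            | nil => exact absurd hx (pvSp_ne_nil sep t)
            | cons p r => simp

lemma splitOn_eq_pvSp (s sep : List Char) (hs : sep ≠ []) :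
    PySem.Chars.splitOn s sep = pvSp sep s := by
  unfold PySem.Chars.splitOn
  rw [pvSp_go sep hs (s.length + 1) s [] [] (by omega)]
  cases hx : pvSp sep s with
  | nil => exact absurd hx (pvSp_ne_nil sep s)
  | cons p r => simp

lemma pvRp_go (old new : List Char) (ho : old ≠ []) :
    ∀ (fuel : ℕ) (l acc : List Char), l.length ≤ fuel →
      PySem.Chars.replace.go old new fuel l acc = acc.reverse ++ pvRp old new l := by
  intro fuel
  induction fuel with
  | zero =>
      intro l acc hl
      have : l = [] := by cases l <;> simp_all
      subst this
      simp [PySem.Chars.replace.go, pvRp_nil]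
  | succ n ih =>
      intro l acc hl
      cases l with
      | nil => simp [PySem.Chars.replace.go, pvRp_nil]
      | cons c t =>
          by_cases hp : old <+: (c :: t)
          · have hb : old.isPrefixOf (c :: t) = true := List.isPrefixOf_iff_prefix.mpr hp
            have hlen : 1 ≤ old.length := List.length_pos_of_ne_nil ho
            simp only [PySem.Chars.replace.go, hb, if_true]
            rw [ih ((c :: t).drop old.length) (new.reverse ++ acc)
              (by simp only [List.length_drop, List.length_cons]
                  simp only [List.length_cons] at hl; omega)]
            rw [pvRp_pos old new (c :: t) ho hp]
            simp
          · have hb : old.isPrefixOf (c :: t) = false := by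
              rw [Bool.eq_false_iff]
              exact fun hc => hp (List.isPrefixOf_iff_prefix.mp hc)
            simp only [PySem.Chars.replace.go, hb, Bool.false_eq_true, if_false]
            rw [ih t (c :: acc) (by simp only [List.length_cons] at hl; omega)]
            rw [pvRp_neg old new c t hp]
            simp

lemma replace_eq_pvRp (s old new : List Char) (ho : old ≠ []) :
    PySem.Chars.replace s old new = pvRp old new s := by
  unfold PySem.Chars.replace
  rw [if_neg (by simpa using ho)]
  rw [pvRp_go old new ho s.length s [] (le_refl _)]
  simp

-- no occurrence of the given pattern can start inside the '<ext-link' prefix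
lemma pv_no_early_S (b : List Char) : ∀ i < 9, ¬ pvSl <+: (pvXl ++ b).drop i := by
  intro i hi
  interval_cases i <;> simp [pvXl, pvSl, List.cons_prefix_cons]

lemma pv_no_early_close (b : List Char) : ∀ i < 9, ¬ pvCl <+: (pvXl ++ b).drop i := by
  intro i hi
  interval_cases i <;> simp [pvXl, pvCl, List.cons_prefix_cons]

-- a '~'-free prefix followed by '~' in the replaced text comes from the text or from an inserted sentinel
lemma pvL2gen : ∀ (w : List Char), (∀ ch ∈ w, ch ≠ '~') → ∀ u : List Char,
    (w ++ ['~']) <+: pvRp pvXl pvSXl u → (w ++ ['~']) <+: u ∨ (w ++ pvXl) <+: u := by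
  intro w
  induction w with
  | nil =>
      intro _ u h
      cases u with
      | nil => rw [pvRp_nil] at h; simp at h
      | cons c t =>
          by_cases hx : pvXl <+: (c :: t)
          · right; simpa using hx
          · rw [pvRp_neg _ _ _ _ hx] at h
            simp only [List.nil_append, List.cons_prefix_cons] at h
            left
            simp only [List.nil_append, List.cons_prefix_cons]
            exact ⟨h.1, List.nil_prefix⟩
  | cons ch w' ihw =>
      intro hw u h
      cases u with
      | nil => rw [pvRp_nil] at h; simp at h
      | cons c t =>
          by_cases hx : pvXl <+: (c :: t)
          · rw [pvRp_pos _ _ _ (by simp [pvXl]) hx] at h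
            have hSX : pvSXl = '~' :: ('B' :: 'R' :: 'E' :: 'A' :: 'K' :: '~' :: pvXl) := by decide
            rw [hSX] at h
            simp only [List.cons_append, List.cons_prefix_cons] at h
            exact absurd h.1 (hw ch (by simp))
          · rw [pvRp_neg _ _ _ _ hx] at h
            simp only [List.cons_append, List.cons_prefix_cons] at h
            rcases ihw (fun x hx' => hw x (by simp [hx'])) t h.2 with h1 | h1
            · left
              simp only [List.cons_append, List.cons_prefix_cons]
              exact ⟨h.1, h1⟩
            · right
              simp only [List.cons_append, List.cons_prefix_cons]
              exact ⟨h.1, h1⟩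

-- under Pre_, the sentinel is never a prefix of the replaced text unless '<ext-link' was
lemma pvL2 (u : List Char) (hx : ¬ pvXl <+: u) (h1 : ¬ pvSl <+: u) (h2 : ¬ pvS2l <+: u) :
    ¬ pvSl <+: pvRp pvXl pvSXl u := by
  intro h
  cases u with
  | nil => rw [pvRp_nil] at h; simp [pvSl] at h
  | cons c t =>
      rw [pvRp_neg _ _ _ _ hx] at h
      have hS : pvSl = '~' :: (['B', 'R', 'E', 'A', 'K'] ++ ['~']) := by decide
      rw [hS, List.cons_prefix_cons] at h
      have hBREAK : ∀ ch ∈ (['B', 'R', 'E', 'A', 'K'] : List Char), ch ≠ '~' := by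
        intro ch hch
        fin_cases hch <;> decide
      rcases pvL2gen ['B', 'R', 'E', 'A', 'K'] hBREAK t h.2 with hc | hc
      · apply h1
        rw [hS, List.cons_prefix_cons]
        exact ⟨h.1.symm ▸ rfl, hc⟩
      · apply h2
        have : pvS2l = '~' :: (['B', 'R', 'E', 'A', 'K'] ++ pvXl) := by decide
        rw [this, List.cons_prefix_cons]
        exact ⟨h.1.symm ▸ rfl, hc⟩

lemma pv_infix_of_tail {x : List Char} {c : Char} {t : List Char} (h : x <:+: t) : x <:+: (c :: t) :=
  h.trans (List.IsSuffix.isInfix ⟨[c], rfl⟩)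

lemma pv_infix_of_drop {x a t : List Char} (h : x <:+: t) : x <:+: (a ++ t) :=
  h.trans (List.IsSuffix.isInfix (List.suffix_append a t))

-- MAIN (A-side): the pieces of A's sentinel split are the first direct-split piece and the
-- tail pieces with '<ext-link' re-attached
lemma pv_main : ∀ (n : ℕ) (l : List Char), l.length ≤ n → ¬ pvSl <:+: l → ¬ pvS2l <:+: l →
    pvSp pvSl (pvRp pvXl pvSXl l)
      = (pvSp pvXl l).headI :: (pvSp pvXl l).tail.map (pvXl ++ ·) := by
  intro n
  induction n with
  | zero =>
      intro l hl _ _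
      have : l = [] := by cases l <;> simp_all
      subst this
      simp [pvRp_nil, pvSp_nil]
  | succ n ih =>
      intro l hl h1 h2
      cases l with
      | nil => simp [pvRp_nil, pvSp_nil]
      | cons c t =>
          by_cases hX : pvXl <+: (c :: t)
          · rcases hX with ⟨t2, ht2⟩
            rw [← ht2] at h1 h2 hl ⊢
            rw [pvRp_pos _ _ _ (by simp [pvXl]) (List.prefix_append pvXl t2), List.drop_left]
            have hSX : pvSXl ++ pvRp pvXl pvSXl t2 = pvSl ++ (pvXl ++ pvRp pvXl pvSXl t2) := by
              rw [show pvSXl = pvSl ++ pvXl from rfl, List.append_assoc]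
            rw [hSX,
              pvSp_append_sep pvSl (pvXl ++ pvRp pvXl pvSXl t2) (by simp [pvSl]),
              pvSp_append_left pvSl pvXl (pvRp pvXl pvSXl t2)
                (by intro i hi; exact pv_no_early_S _ i (by simpa [pvXl] using hi))]
            have hlen : t2.length ≤ n := by
              simp only [List.length_append, pvXl] at hl; simp at hl; omega
            rw [ih t2 hlen
              (fun hc => h1 (pv_infix_of_drop hc))
              (fun hc => h2 (pv_infix_of_drop hc))]
            rw [pvSp_append_sep pvXl t2 (by simp [pvXl])]
            cases hpr : pvSp pvXl t2 with
            | nil => exact absurd hpr (pvSp_ne_nil pvXl t2)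
            | cons p r => simp
          · rw [pvRp_neg _ _ _ _ hX]
            have hnS : ¬ pvSl <+: (c :: pvRp pvXl pvSXl t) := by
              have := pvL2 (c :: t) hX
                (fun hc => h1 hc.isInfix) (fun hc => h2 hc.isInfix)
              rw [pvRp_neg _ _ _ _ hX] at this
              exact this
            rw [pvSp_neg _ _ _ hnS]
            have hlen : t.length ≤ n := by simp at hl; omega
            rw [ih t hlen (fun hc => h1 (pv_infix_of_tail hc)) (fun hc => h2 (pv_infix_of_tail hc))]
            rw [pvSp_neg _ _ _ hX]
            cases hpr : pvSp pvXl t with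
            | nil => exact absurd hpr (pvSp_ne_nil pvXl t)
            | cons p r => simp

-- the first direct-split piece never starts with '<ext-link'
lemma pvL3 (l : List Char) : ¬ pvXl <+: (pvSp pvXl l).headI := by
  cases l with
  | nil => simp [pvSp_nil, pvXl]
  | cons c t =>
      by_cases h : pvXl <+: (c :: t)
      · rw [pvSp_pos _ _ (by simp [pvXl]) h]; simp [pvXl]
      · rw [pvSp_neg _ _ _ h]
        cases hx : pvSp pvXl t with
        | nil => exact absurd hx (pvSp_ne_nil pvXl t)
        | cons p r =>
            intro hc
            simp only [List.modifyHead_cons, List.headI_cons] at hc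
            apply h
            have hp : p <+: t := by
              have := pvSp_headI_prefix pvXl t; rw [hx] at this; simpa using this
            exact hc.trans (List.cons_prefix_cons.mpr ⟨rfl, hp⟩)

-- find characterisations
lemma pv_find_eq_of (s sub : List Char) (j : ℕ) (h1 : sub <+: s.drop j)
    (h2 : ∀ i < j, ¬ sub <+: s.drop i) : PySem.Chars.find s sub = (j : ℤ) := by
  have hinf : sub <:+: s := h1.isInfix.trans (List.IsSuffix.isInfix (List.drop_suffix j s))
  have hpos : 0 ≤ PySem.Chars.find s sub := (PySem.Chars.find_nonneg_iff s sub).mpr hinf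
  have hspec := PySem.Chars.find_spec hpos
  rcases lt_trichotomy (PySem.Chars.find s sub).toNat j with hlt | heq | hgt
  · exact absurd hspec.1 (h2 _ hlt)
  · omega
  · exact absurd h1 (hspec.2 j hgt)

lemma pv_find_append (q sub : List Char)
    (hne : ∀ i < 9, ¬ sub <+: (pvXl ++ q).drop i)
    (hq : 0 ≤ PySem.Chars.find q sub) :
    PySem.Chars.find (pvXl ++ q) sub = 9 + PySem.Chars.find q sub := by
  have hspec := PySem.Chars.find_spec hq
  have hXlen : pvXl.length = 9 := by simp [pvXl]
  have h1 : sub <+: (pvXl ++ q).drop (9 + (PySem.Chars.find q sub).toNat) := by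
    rw [List.drop_append, hXlen]
    simpa [List.drop_of_length_le, hXlen] using hspec.1
  have h2 : ∀ i < 9 + (PySem.Chars.find q sub).toNat, ¬ sub <+: (pvXl ++ q).drop i := by
    intro i hi
    by_cases hi9 : i < 9
    · exact hne i hi9
    · rw [List.drop_append, hXlen, List.drop_of_length_le (by rw [hXlen]; omega)]
      simp only [List.nil_append]
      exact hspec.2 (i - 9) (by omega)
  have := pv_find_eq_of (pvXl ++ q) sub (9 + (PySem.Chars.find q sub).toNat) h1 h2
  rw [this]; push_cast; omega

lemma pv_infix_append_iff (q sub : List Char)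
    (hne : ∀ i < 9, ¬ sub <+: (pvXl ++ q).drop i) :
    (sub <:+: (pvXl ++ q)) ↔ (sub <:+: q) := by
  constructor
  · intro h
    have hex := (PySem.Chars.exists_prefix_drop_iff_isIn sub (pvXl ++ q)).mpr
      ((PySem.Chars.isIn_iff_infix sub (pvXl ++ q)).mpr h)
    rcases hex with ⟨j, hj⟩
    have hXlen : pvXl.length = 9 := by simp [pvXl]
    by_cases hj9 : j < 9
    · exact absurd hj (hne j hj9)
    · rw [List.drop_append, hXlen, List.drop_of_length_le (by omega)] at hj
      simp only [List.nil_append] at hj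
      exact hj.isInfix.trans (List.IsSuffix.isInfix (List.drop_suffix _ q))
  · intro h; exact pv_infix_of_drop h

-- ===== new B-side lemmas =====

-- the head piece of the direct split (text before the next '<ext-link')
def pvHeadPiece (body : List Char) : List Char :=
  if PySem.Chars.find body pvXl = -1 then body else body.take (PySem.Chars.find body pvXl).toNat

lemma pvSp_no_occ (sep l : List Char) (h : ¬ sep <:+: l) : pvSp sep l = [l] := by
  induction l with
  | nil => exact pvSp_nil sep
  | cons c t ih =>
      rw [pvSp_neg sep c t (fun hc => h hc.isInfix),
        ih (fun hc => h (pv_infix_of_tail hc))]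
      simp

-- prefix transfer between a list and its take
lemma pv_prefix_of_take {sub l : List Char} {m j : ℕ} (h : sub <+: (l.take m).drop j) :
    sub <+: l.drop j := by
  rw [List.drop_take] at h
  exact h.trans (List.take_prefix _ _)

lemma pv_prefix_take {sub l : List Char} {m j : ℕ} (h : sub <+: l.drop j)
    (hm : j + sub.length ≤ m) : sub <+: (l.take m).drop j := by
  rw [List.drop_take]
  exact List.prefix_take_iff.mpr ⟨h, by omega⟩

lemma pv_find_take (body sub : List Char) (m : ℕ)
    (h0 : 0 ≤ PySem.Chars.find body sub)
    (hm : (PySem.Chars.find body sub).toNat + sub.length ≤ m) :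
    PySem.Chars.find (body.take m) sub = PySem.Chars.find body sub := by
  have hspec := PySem.Chars.find_spec h0
  have := pv_find_eq_of (body.take m) sub (PySem.Chars.find body sub).toNat
    (pv_prefix_take hspec.1 hm)
    (fun i hi hc => hspec.2 i hi (pv_prefix_of_take hc))
  rw [this]; omega

lemma pv_infix_take_iff (body : List Char) (m : ℕ) :
    pvCl <:+: body.take m ↔
      (0 ≤ PySem.Chars.find body pvCl ∧ (PySem.Chars.find body pvCl).toNat + 11 ≤ m) := by
  constructor
  · intro h
    rcases (PySem.Chars.exists_prefix_drop_iff_isIn pvCl (body.take m)).mpr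
      ((PySem.Chars.isIn_iff_infix pvCl (body.take m)).mpr h) with ⟨j, hj⟩
    have hb : pvCl <+: body.drop j := pv_prefix_of_take hj
    have hinf : pvCl <:+: body := hb.isInfix.trans (List.IsSuffix.isInfix (List.drop_suffix j body))
    have h0 : 0 ≤ PySem.Chars.find body pvCl := (PySem.Chars.find_nonneg_iff body pvCl).mpr hinf
    have hspec := PySem.Chars.find_spec h0
    have hmin : (PySem.Chars.find body pvCl).toNat ≤ j := by
      by_contra hc
      exact hspec.2 j (by omega) hb
    have hjlen : j + 11 ≤ m := by
      have hlen := List.IsPrefix.length_le hj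
      have hClen : pvCl.length = 11 := by decide
      rw [hClen, List.length_drop, List.length_take] at hlen
      omega
    exact ⟨h0, by omega⟩
  · rintro ⟨h0, hm⟩
    have hspec := PySem.Chars.find_spec h0
    have : pvCl <+: (body.take m).drop (PySem.Chars.find body pvCl).toNat :=
      pv_prefix_take hspec.1 (by simp only [show pvCl.length = 11 from by decide]; omega)
    exact this.isInfix.trans (List.IsSuffix.isInfix (List.drop_suffix _ _))

-- the element / content / content2 computed by pvHd's positive branch, named for the proofs
def pvElem (body : List Char) : List Char :=
  pvXl ++ PySem.List.slice body none (some (PySem.Chars.find body pvCl + 11))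
def pvCont (body : List Char) : List Char :=
  PySem.List.slice (pvElem body) (some (PySem.Chars.find (pvElem body) ['>'] + 1)) none
def pvCont2 (body : List Char) : List Char :=
  PySem.List.slice (pvCont body) none (some (PySem.Chars.find (pvCont body) pvCl))

lemma pvHd_neg (body : List Char)
    (hc : ¬ (PySem.Chars.find body pvCl ≠ -1 ∧
      (PySem.Chars.find body pvXl = -1 ∨ PySem.Chars.find body pvCl + 11 ≤ PySem.Chars.find body pvXl))) :
    pvHd body = [] := by
  simp only [pvHd]
  rw [if_neg hc]

lemma pvHd_pos (body : List Char)
    (hc : PySem.Chars.find body pvCl ≠ -1 ∧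
      (PySem.Chars.find body pvXl = -1 ∨ PySem.Chars.find body pvCl + 11 ≤ PySem.Chars.find body pvXl)) :
    pvHd body = [(pvCont2 body, pvElem body)] := by
  simp only [pvHd, pvElem, pvCont, pvCont2]
  rw [if_pos hc]

lemma pv_nonneg_of_ne (l sub : List Char) (h : PySem.Chars.find l sub ≠ -1) :
    0 ≤ PySem.Chars.find l sub := by
  rcases (PySem.Chars.neg_one_le_find l sub).lt_or_eq with h1 | h1
  · omega
  · exact absurd h1.symm h

lemma pv_str_find (l : List Char) (sub : String) :
    PySem.Str.find (String.ofList l) sub = PySem.Chars.find l sub.toList := by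
  unfold PySem.Str.find
  rw [String.toList_ofList]

lemma pv_str_slice (l : List Char) (a b : Option ℤ) :
    PySem.Str.slice (String.ofList l) a b = String.ofList (PySem.List.slice l a b) := by
  unfold PySem.Str.slice
  rw [String.toList_ofList, PySem.Chars.slice_eq_listSlice]

lemma pv_str_startswith (q : List Char) :
    PySem.Str.startswith (String.ofList (pvXl ++ q)) "<ext-link" = true := by
  unfold PySem.Str.startswith PySem.Chars.startswith
  simp only [String.toList_ofList]
  exact List.isPrefixOf_iff_prefix.mpr (List.prefix_append pvXl q)

lemma pv_str_isIn_close (q : List Char) :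
    PySem.Str.isIn "</ext-link>" (String.ofList (pvXl ++ q)) = true ↔ pvCl <:+: q := by
  unfold PySem.Str.isIn
  simp only [String.toList_ofList]
  rw [PySem.Chars.isIn_iff_infix]
  exact pv_infix_append_iff q pvCl (pv_no_early_close q)

-- positive-branch core: A's loop body on chunk '<ext-link' ++ q computes B's pair
lemma pv_chunk_pos (body q : List Char) (nmc : String)
    (h0 : 0 ≤ PySem.Chars.find body pvCl)
    (hfq : PySem.Chars.find q pvCl = PySem.Chars.find body pvCl)
    (htake : q.take (PySem.Chars.find body pvCl + 11).toNat
      = body.take (PySem.Chars.find body pvCl + 11).toNat) :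
    pvBodyA nmc (String.ofList (pvXl ++ q)) = pvStepB nmc (pvCont2 body, pvElem body) := by
  set f := PySem.Chars.find body pvCl with hf
  have hinfq : pvCl <:+: q := by
    have : 0 ≤ PySem.Chars.find q pvCl := by rw [hfq]; exact h0
    exact (PySem.Chars.find_nonneg_iff q pvCl).mp this
  have hfindL : PySem.Chars.find (pvXl ++ q) pvCl = 9 + f := by
    rw [pv_find_append q pvCl (pv_no_early_close q) (by rw [hfq]; exact h0), hfq]
  have hElemL : PySem.List.slice (pvXl ++ q) none (some (9 + f + 11)) = pvElem body := by
    rw [PySem.List.slice_to _ (by omega)]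
    rw [show (9 + f + 11).toNat = 9 + (f + 11).toNat from by omega]
    rw [List.take_append, List.take_of_length_le (by simp [pvXl]),
      show pvXl.length = 9 from by decide]
    rw [show 9 + (f + 11).toNat - 9 = (f + 11).toNat from by omega, htake]
    rw [pvElem, PySem.List.slice_to _ (by omega)]
  rw [pvBodyA, if_pos (pv_str_startswith q),
    if_pos ((pv_str_isIn_close q).mpr hinfq)]
  simp only [pv_str_find, pv_str_slice,
    show (">" : String).toList = ['>'] from by decide,
    show ("</ext-link>" : String).toList = pvCl from by decide,
    PySem.List.slice_zero_start, pvStepB, pvCont2, pvCont]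
  rw [hfindL, hElemL]

-- per-chunk lemma: A's loop body on the chunk equals B's pair construction folded
lemma pv_chunk (body : List Char) (nmc : String) :
    pvBodyA nmc (String.ofList (pvXl ++ pvHeadPiece body)) = (pvHd body).foldl pvStepB nmc := by
  by_cases hn : PySem.Chars.find body pvXl = -1
  · rw [pvHeadPiece, if_pos hn]
    by_cases hcl : PySem.Chars.find body pvCl = -1
    · rw [pvHd_neg body (by simp [hcl]), List.foldl_nil, pvBodyA,
        if_pos (pv_str_startswith body), if_neg]
      rw [pv_str_isIn_close body]
      intro hinf
      exact (PySem.Chars.find_eq_neg_one_iff body pvCl).mp hcl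
        (hinf.trans (List.IsSuffix.isInfix (List.drop_suffix 0 body)) |>.trans (by simp))
    · have h0 : 0 ≤ PySem.Chars.find body pvCl := pv_nonneg_of_ne body pvCl hcl
      rw [pvHd_pos body ⟨hcl, Or.inl hn⟩, List.foldl_cons, List.foldl_nil]
      exact pv_chunk_pos body body nmc h0 rfl rfl
  · have h0n : 0 ≤ PySem.Chars.find body pvXl := pv_nonneg_of_ne body pvXl hn
    rw [pvHeadPiece, if_neg hn]
    by_cases hc2 : PySem.Chars.find body pvCl ≠ -1 ∧
        PySem.Chars.find body pvCl + 11 ≤ PySem.Chars.find body pvXl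
    · have h0 : 0 ≤ PySem.Chars.find body pvCl := pv_nonneg_of_ne body pvCl hc2.1
      rw [pvHd_pos body ⟨hc2.1, Or.inr hc2.2⟩, List.foldl_cons, List.foldl_nil]
      apply pv_chunk_pos body _ nmc h0
      · exact pv_find_take body pvCl (PySem.Chars.find body pvXl).toNat h0
          (by rw [show pvCl.length = 11 from by decide]; omega)
      · rw [List.take_take]
        congr 1
        omega
    · rw [pvHd_neg body (by
        intro hcc
        rcases hcc with ⟨hne, hor⟩
        rcases hor with hor | hor
        · exact hn hor
        · exact hc2 ⟨hne, hor⟩), List.foldl_nil]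
      rw [pvBodyA, if_pos (pv_str_startswith _), if_neg]
      rw [pv_str_isIn_close]
      intro hinf
      rcases (pv_infix_take_iff body (PySem.Chars.find body pvXl).toNat).mp hinf with ⟨hc0, hcm⟩
      exact hc2 ⟨by omega, by omega⟩

-- fold over the split pieces equals fold over the collected pairs
-- decomposition of a list at the first occurrence of '<ext-link'
lemma pv_decomp (l : List Char) (h0 : 0 ≤ PySem.Chars.find l pvXl) :
    l = l.take (PySem.Chars.find l pvXl).toNat ++ pvXl ++ l.drop ((PySem.Chars.find l pvXl).toNat + 9) := by
  set i := (PySem.Chars.find l pvXl).toNat with hi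
  rcases (PySem.Chars.find_spec h0).1 with ⟨t, ht⟩
  have ht2 : l.drop (i + 9) = t := by
    have : (l.drop i).drop 9 = t := by
      rw [← ht, List.drop_append_of_le_length (by decide)]
      simp [show pvXl.length = 9 from by decide]
    rw [← this, List.drop_drop]
  calc l = l.take i ++ l.drop i := (List.take_append_drop i l).symm
    _ = l.take i ++ pvXl ++ l.drop (i + 9) := by rw [← ht, ht2, List.append_assoc]

lemma pvSp_first (l : List Char) (h0 : 0 ≤ PySem.Chars.find l pvXl) :
    pvSp pvXl l = l.take (PySem.Chars.find l pvXl).toNat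
      :: pvSp pvXl (l.drop ((PySem.Chars.find l pvXl).toNat + 9)) := by
  set i := (PySem.Chars.find l pvXl).toNat with hi
  have hspec := PySem.Chars.find_spec h0
  have hilen : i + 9 ≤ l.length := by
    have := List.IsPrefix.length_le hspec.1
    simp only [List.length_drop, show pvXl.length = 9 from by decide] at this
    omega
  have hd := pv_decomp l h0
  rw [← hi] at hd
  conv_lhs => rw [hd]
  rw [List.append_assoc,
    pvSp_append_left pvXl (l.take i) (pvXl ++ l.drop (i + 9))
      (by
        intro j hj
        rw [← List.append_assoc, ← hd]
        have hjlt : j < i := by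
          simp only [List.length_take] at hj; omega
        exact hspec.2 j hjlt),
    pvSp_append_sep pvXl _ (by simp [pvXl])]
  simp

lemma pvPairs_pos (s : List Char) (hf : PySem.Chars.find s pvXl = -1) : pvPairs s = [] := by
  rw [pvPairs, dif_pos hf]

lemma pvPairs_neg (s : List Char) (hf : ¬ PySem.Chars.find s pvXl = -1) :
    pvPairs s = pvHd (s.drop ((PySem.Chars.find s pvXl).toNat + 9))
      ++ pvPairs (s.drop ((PySem.Chars.find s pvXl).toNat + 9)) := by
  rw [pvPairs, dif_neg hf]

lemma pv_K : ∀ (n : ℕ) (body : List Char), body.length ≤ n → ∀ (nmc : String),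
    ((pvSp pvXl body).map (fun x => String.ofList (pvXl ++ x))).foldl pvBodyA nmc
      = (pvHd body ++ pvPairs body).foldl pvStepB nmc := by
  intro n
  induction n with
  | zero =>
      intro body hl nmc
      have hb : body = [] := by cases body <;> simp_all
      subst hb
      have hf : PySem.Chars.find ([] : List Char) pvXl = -1 := by decide
      have hchunk := pv_chunk [] nmc
      rw [pvHeadPiece, if_pos hf] at hchunk
      rw [pvSp_nil]
      simp only [List.map_cons, List.map_nil, List.foldl_cons, List.foldl_nil]
      rw [hchunk, pvPairs_pos [] hf, List.append_nil]
  | succ n ih =>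
      intro body hl nmc
      by_cases hf : PySem.Chars.find body pvXl = -1
      · have hno : ¬ pvXl <:+: body := (PySem.Chars.find_eq_neg_one_iff body pvXl).mp hf
        rw [pvSp_no_occ pvXl body hno]
        simp only [List.map_cons, List.map_nil, List.foldl_cons, List.foldl_nil]
        have hchunk := pv_chunk body nmc
        rw [pvHeadPiece, if_pos hf] at hchunk
        rw [hchunk, pvPairs_pos body hf, List.append_nil]
      · have h0 : 0 ≤ PySem.Chars.find body pvXl := by
          rcases (PySem.Chars.neg_one_le_find body pvXl).lt_or_eq with h1 | h1
          · omega
          · exact absurd h1.symm hf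
        set i := (PySem.Chars.find body pvXl).toNat with hi
        set body2 := body.drop (i + 9) with hb2
        have hlen2 : body2.length ≤ n := by
          have hilen : i + 9 ≤ body.length := by
            have := List.IsPrefix.length_le (PySem.Chars.find_spec h0).1
            simp only [List.length_drop, show pvXl.length = 9 from by decide] at this
            omega
          simp only [hb2, List.length_drop]
          omega
        rw [pvSp_first body h0, ← hi, ← hb2]
        simp only [List.map_cons, List.foldl_cons]
        have hchunk := pv_chunk body nmc
        rw [pvHeadPiece, if_neg hf] at hchunk
        rw [← hi] at hchunk
        rw [hchunk, pvPairs_neg body hf, ← hi, ← hb2, List.foldl_append]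
        exact ih body2 hlen2 _

lemma pv_mainB (l : List Char) (nmc : String) :
    (((pvSp pvXl l).tail.map (pvXl ++ ·)).map String.ofList).foldl pvBodyA nmc
      = (pvPairs l).foldl pvStepB nmc := by
  by_cases hf : PySem.Chars.find l pvXl = -1
  · rw [pvSp_no_occ pvXl l ((PySem.Chars.find_eq_neg_one_iff l pvXl).mp hf)]
    rw [pvPairs_pos l hf]
    simp
  · have h0 : 0 ≤ PySem.Chars.find l pvXl := by
      rcases (PySem.Chars.neg_one_le_find l pvXl).lt_or_eq with h1 | h1
      · omega
      · exact absurd h1.symm hf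
    rw [pvSp_first l h0, pvPairs_neg l hf]
    simp only [List.tail_cons, List.map_map]
    rw [← pv_K (l.drop ((PySem.Chars.find l pvXl).toNat + 9)).length _ (le_refl _) nmc]
    rfl

-- the two folds produce the same result (under Pre_'s first clause)
lemma pv_fold_eq (ref : String)
    (h1 : PySem.Str.isIn "~BREAK~" ref = false)
    (h2 : PySem.Str.isIn "~BREAK<ext-link" ref = false) (s : String) :
    ((PySem.Str.split? (PySem.Str.replace ref "<ext-link" "~BREAK~<ext-link") "~BREAK~").getD []).foldl
        pvBodyA s
      = (pvPairs ref.toList).foldl pvStepB s := by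
  have hX9 : ("<ext-link" : String).toList = pvXl := by decide
  have hS7 : ("~BREAK~" : String).toList = pvSl := by decide
  have hSX : ("~BREAK~<ext-link" : String).toList = pvSXl := by decide
  have hS2 : ("~BREAK<ext-link" : String).toList = pvS2l := by decide
  have hA : (PySem.Str.split? (PySem.Str.replace ref "<ext-link" "~BREAK~<ext-link") "~BREAK~").getD []
      = (pvSp pvSl (pvRp pvXl pvSXl ref.toList)).map String.ofList := by
    unfold PySem.Str.split? PySem.Chars.split?
    rw [if_neg (by rw [hS7]; decide)]
    simp only [Option.map_some, Option.getD_some]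
    rw [PySem.Str.toList_replace, hX9, hSX, hS7,
      replace_eq_pvRp _ _ _ (by simp [pvXl]), splitOn_eq_pvSp _ _ (by simp [pvSl])]
  rw [hA]
  have hpre1 : ¬ pvSl <:+: ref.toList := by
    unfold PySem.Str.isIn at h1
    rw [hS7] at h1
    exact (PySem.Chars.isIn_eq_false_iff _ _).mp h1
  have hpre2 : ¬ pvS2l <:+: ref.toList := by
    unfold PySem.Str.isIn at h2
    rw [hS2] at h2
    exact (PySem.Chars.isIn_eq_false_iff _ _).mp h2
  rw [pv_main ref.toList.length ref.toList (le_refl _) hpre1 hpre2]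
  have hstep : pvBodyA s (String.ofList (pvSp pvXl ref.toList).headI) = s := by
    unfold pvBodyA
    rw [if_neg]
    unfold PySem.Str.startswith PySem.Chars.startswith
    simp only [String.toList_ofList]
    intro hc
    exact pvL3 ref.toList (by simpa [pvXl] using List.isPrefixOf_iff_prefix.mp hc)
  simp only [List.map_cons, List.foldl_cons, hstep]
  exact pv_mainB ref.toList s

-- ===== VERDICT (by name: the statement is the Claim_ definition above) =====
theorem fix_mixed_citation_ext_link_spec : Claim_equal_fix_mixed_citation_ext_link := by
  intro ref _ hpre
  unfold Spec_fix_mixed_citation_ext_link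
  unfold fix_mixed_citation_ext_link fix_mixed_citation_ext_link_alt
  rcases hpre with hpre | hguard | hmixed
  · simp only [pv_fold_eq ref hpre.1 hpre.2]
  · simp only [hguard, Bool.false_eq_true, if_false]
  · by_cases hc1 : (PySem.Str.isIn "<ext-link" ref && PySem.Str.isIn "<mixed-citation>" ref) = true
    · simp only [hc1, if_true, hmixed, Bool.not_true, Bool.false_eq_true, if_false]
    · simp only [Bool.not_eq_true] at hc1
      simp only [hc1, Bool.false_eq_true, if_false]
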